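-- pv_equiv track=rewrite | github.com/PeterChen7274/2048-Game | calhack.py | mergable
-- ===== SOURCE A (Python) =====
-- def mergable(original, direction):
--     lst = original[:]
--     if direction==-1:
--         lst.reverse()
--     for x in range(0, len(lst)-1):
--         if (lst[x] == lst[x+1] and lst[x]!=0) or (lst[x] != 0 and lst[x+1] == 0):
--             return True
--     return False
-- ===== SOURCE B (Python) =====
-- def mergable(original, direction):
--     # Simulate the move and report whether anything would change.
--     # Orient the row so that the move is "to the left".
--     row = list(original) if direction == -1 else original[::-1]
--     tiles = [v for v in row if v != 0]
--     out = []
--     i = 0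
--     while i < len(tiles):
--         if i + 1 < len(tiles) and tiles[i] == tiles[i + 1]:
--             out.append(2 * tiles[i])
--             i += 2
--         else:
--             out.append(tiles[i])
--             i += 1
--     out += [0] * (len(row) - len(out))
--     return out != row
-- ===== Notes on version B (the rewrite author's own statement) =====
-- stated objective: alternative
-- what changed: B replaces A's adjacency scan (equal neighbours or a nonzero before a zero) by actually simulating the 2048 move: orient the row, drop zeros, merge adjacent equal tiles pairwise, pad with zeros, and report whether the resulting row differs from the original.
import Mathlib
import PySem

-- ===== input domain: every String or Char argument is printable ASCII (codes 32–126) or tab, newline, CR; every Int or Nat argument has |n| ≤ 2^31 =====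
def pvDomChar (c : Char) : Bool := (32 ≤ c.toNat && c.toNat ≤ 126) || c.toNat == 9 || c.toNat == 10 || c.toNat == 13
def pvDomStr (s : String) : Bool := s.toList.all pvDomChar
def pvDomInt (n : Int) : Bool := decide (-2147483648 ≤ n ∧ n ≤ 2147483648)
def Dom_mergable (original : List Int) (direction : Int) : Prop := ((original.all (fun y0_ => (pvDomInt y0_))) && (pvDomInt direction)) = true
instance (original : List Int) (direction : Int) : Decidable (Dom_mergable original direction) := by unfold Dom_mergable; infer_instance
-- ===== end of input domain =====

-- B replaces A's adjacency scan by simulating the 2048 move (compact + merge) and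
-- comparing the resulting row with the original (objective: alternative algorithm).

-- ===== PORT A =====
-- for x in range(0, len(lst)-1): if cond: return True  — index loop with early exit
def mergableLoop (lst : List Int) (x : Nat) : Bool :=
  if x < lst.length - 1 then
    (let a := PySem.List.pyGet? lst (x : Int)
     let b := PySem.List.pyGet? lst ((x : Int) + 1)
     ((a == b) && (a != some 0)) || ((a != some 0) && (b == some 0))) || mergableLoop lst (x + 1)
  else false
termination_by lst.length - 1 - x

def mergable (original : List Int) (direction : Int) : Bool :=
  let lst := original
  let lst := if direction == -1 then lst.reverse else lst
  mergableLoop lst 0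

-- ===== PORT B =====
-- the while loop over `tiles` with i += 2 on a merge, i += 1 otherwise
def mergePairsB : List Int → List Int
  | [] => []
  | [a] => [a]
  | a :: b :: t => if a == b then (2 * a) :: mergePairsB t else a :: mergePairsB (b :: t)

def mergable_alt (original : List Int) (direction : Int) : Bool :=
  -- original[::-1] is reversal (PySem.List.slice?_none_none_neg_one)
  let row := if direction == -1 then original else original.reverse
  let tiles := row.filter (fun v => v != 0)
  let merged := mergePairsB tiles
  let out := merged ++ List.replicate (row.length - merged.length) 0
  out != row

-- ===== PRECONDITION & SPEC =====
def Spec_mergable (original : List Int) (direction : Int) (out : Bool) : Prop := out = mergable_alt original direction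
instance (original : List Int) (direction : Int) (out : Bool) : Decidable (Spec_mergable original direction out) := by unfold Spec_mergable; infer_instance

-- ===== CLAIM (what is proved, stated in full; the proofs are below) =====
def Claim_equal_mergable : Prop := ∀ (original : List Int) (direction : Int), Dom_mergable original direction → Spec_mergable original direction (mergable original direction)

-- ===== LEMMAS AND PROOFS =====

-- A's pair condition (condA) and the same condition read from the reversed list (condB)
def condA (a b : Int) : Bool := ((a == b) && (a != 0)) || ((a != 0) && (b == 0))
def condB (a b : Int) : Bool := ((a == b) && (a != 0)) || ((a == 0) && (b != 0))

def badA : List Int → Bool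
  | a :: b :: t => condA a b || badA (b :: t)
  | _ => false

def badB : List Int → Bool
  | a :: b :: t => condB a b || badB (b :: t)
  | _ => false

def hasAdj : List Int → Bool
  | a :: b :: t => (a == b) || hasAdj (b :: t)
  | _ => false

-- B's simulated move on the oriented row
def moveB (M : List Int) : List Int :=
  let tiles := M.filter (fun v => v != 0)
  let merged := mergePairsB tiles
  merged ++ List.replicate (M.length - merged.length) 0

theorem condA_swap (a b : Int) : condA a b = condB b a := by
  by_cases h : a = b
  · subst h; simp [condA, condB, Bool.and_comm]
  · have h1 : (a == b) = false := by simp [h]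
    have h2 : (b == a) = false := by simp [Ne.symm h]
    simp [condA, condB, h1, h2, Bool.and_comm]

theorem loopA_eq (lst : List Int) (x : Nat) : mergableLoop lst x = badA (lst.drop x) := by
  unfold mergableLoop
  split
  · next h =>
    have hx : x < lst.length := by omega
    have hx1 : x + 1 < lst.length := by omega
    have g1 : PySem.List.pyGet? lst (x : Int) = some lst[x] := by
      simp [pysem, hx]
    have g2 : PySem.List.pyGet? lst ((x : Int) + 1) = some lst[x + 1] := by
      rw [PySem.List.pyGet?_eq_some_getElem lst (by omega) (by exact_mod_cast hx1)]
      have e : ((x : Int) + 1).toNat = x + 1 := by omega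
      simp [e]
    simp only [g1, g2]
    rw [loopA_eq lst (x + 1)]
    rw [List.drop_eq_getElem_cons hx]
    rw [List.drop_eq_getElem_cons hx1]
    rw [show badA (lst[x] :: lst[x + 1] :: lst.drop (x + 1 + 1)) =
      (condA lst[x] lst[x + 1] || badA (lst[x + 1] :: lst.drop (x + 1 + 1))) from rfl]
    rfl
  · next h =>
    have hlen : (lst.drop x).length ≤ 1 := by simp; omega
    match hd : lst.drop x with
    | [] => rfl
    | [a] => rfl
    | a :: b :: t => rw [hd] at hlen; simp at hlen
termination_by lst.length - 1 - x

theorem badB_append_last (xs : List Int) (a b : Int) :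
    badB (xs ++ [a, b]) = (badB (xs ++ [a]) || condB a b) := by
  induction xs with
  | nil =>
    simp only [List.nil_append]
    rw [show badB [a, b] = (condB a b || badB [b]) from rfl,
        show badB [b] = false from rfl, show badB [a] = false from rfl]
    simp [Bool.or_comm]
  | cons y ys ih =>
    cases ys with
    | nil =>
      simp only [List.nil_append, List.cons_append]
      rw [show badB [y, a, b] = (condB y a || badB [a, b]) from rfl,
          show badB [a, b] = (condB a b || badB [b]) from rfl,
          show badB [b] = false from rfl,
          show badB [y, a] = (condB y a || badB [a]) from rfl,
          show badB [a] = false from rfl]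
      simp
    | cons z zs =>
      have e1 : (y :: z :: zs) ++ [a, b] = y :: z :: (zs ++ [a, b]) := by simp
      have e2 : (y :: z :: zs) ++ [a] = y :: z :: (zs ++ [a]) := by simp
      rw [e1, e2,
          show badB (y :: z :: (zs ++ [a, b])) = (condB y z || badB (z :: (zs ++ [a, b]))) from rfl,
          show badB (y :: z :: (zs ++ [a])) = (condB y z || badB (z :: (zs ++ [a]))) from rfl]
      have e3 : z :: (zs ++ [a, b]) = (z :: zs) ++ [a, b] := by simp
      have e4 : z :: (zs ++ [a]) = (z :: zs) ++ [a] := by simp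
      rw [e3, e4, ih, Bool.or_assoc]

theorem badA_eq_badB_reverse (l : List Int) : badA l = badB l.reverse := by
  match l with
  | [] => rfl
  | [a] => rfl
  | a :: b :: t =>
    rw [show badA (a :: b :: t) = (condA a b || badA (b :: t)) from rfl,
        badA_eq_badB_reverse (b :: t)]
    have e1 : (a :: b :: t).reverse = t.reverse ++ [b, a] := by simp
    rw [e1, badB_append_last t.reverse b a]
    have e2 : t.reverse ++ [b] = (b :: t).reverse := by simp
    rw [e2, condA_swap, Bool.or_comm]
termination_by l.length

theorem mergePairsB_length_le (l : List Int) : (mergePairsB l).length ≤ l.length := by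
  match l with
  | [] => simp [mergePairsB]
  | [a] => simp [mergePairsB]
  | a :: b :: t =>
    rw [show mergePairsB (a :: b :: t) =
      (if a == b then (2 * a) :: mergePairsB t else a :: mergePairsB (b :: t)) from rfl]
    split
    · have := mergePairsB_length_le t
      simp only [List.length_cons]; omega
    · have := mergePairsB_length_le (b :: t)
      simp only [List.length_cons] at *; omega
termination_by l.length

theorem mergePairsB_length_lt (l : List Int) (h : hasAdj l = true) :
    (mergePairsB l).length < l.length := by
  match l with
  | [] => simp [hasAdj] at h
  | [a] => simp [hasAdj] at h
  | a :: b :: t =>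
    rw [show mergePairsB (a :: b :: t) =
      (if a == b then (2 * a) :: mergePairsB t else a :: mergePairsB (b :: t)) from rfl]
    by_cases hab : (a == b) = true
    · rw [if_pos hab]
      have := mergePairsB_length_le t
      simp only [List.length_cons]; omega
    · have hab' : (a == b) = false := by simpa using hab
      rw [if_neg (by simp [hab'])]
      have hadj : hasAdj (b :: t) = true := by
        rw [show hasAdj (a :: b :: t) = ((a == b) || hasAdj (b :: t)) from rfl, hab'] at h
        simpa using h
      have := mergePairsB_length_lt (b :: t) hadj
      simp only [List.length_cons] at *; omega
termination_by l.length

theorem mergePairsB_of_noAdj (l : List Int) (h : hasAdj l = false) : mergePairsB l = l := by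
  match l with
  | [] => rfl
  | [a] => rfl
  | a :: b :: t =>
    have h1 : (a == b) = false := by
      by_contra hc
      simp only [Bool.not_eq_false] at hc
      rw [show hasAdj (a :: b :: t) = ((a == b) || hasAdj (b :: t)) from rfl, hc] at h
      simp at h
    have h2 : hasAdj (b :: t) = false := by
      rw [show hasAdj (a :: b :: t) = ((a == b) || hasAdj (b :: t)) from rfl, h1] at h
      simpa using h
    rw [show mergePairsB (a :: b :: t) =
      (if a == b then (2 * a) :: mergePairsB t else a :: mergePairsB (b :: t)) from rfl,
      if_neg (by simp [h1]), mergePairsB_of_noAdj (b :: t) h2]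
termination_by l.length

theorem mergePairsB_nonzero (l : List Int) (h : ∀ v ∈ l, v ≠ 0) :
    ∀ v ∈ mergePairsB l, v ≠ 0 := by
  match l with
  | [] => simp [mergePairsB]
  | [a] => simpa [mergePairsB] using h
  | a :: b :: t =>
    intro v hv
    rw [show mergePairsB (a :: b :: t) =
      (if a == b then (2 * a) :: mergePairsB t else a :: mergePairsB (b :: t)) from rfl] at hv
    split at hv
    · rcases List.mem_cons.mp hv with rfl | hv'
      · have := h a (by simp); omega
      · exact mergePairsB_nonzero t (fun w hw => h w (by simp [hw])) v hv'
    · rcases List.mem_cons.mp hv with rfl | hv'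
      · exact h v (by simp)
      · exact mergePairsB_nonzero (b :: t) (fun w hw => h w (by simp at hw ⊢; tauto)) v hv'
termination_by l.length

theorem badB_zeros (k : Nat) : badB (List.replicate k 0) = false := by
  induction k with
  | zero => rfl
  | succ j ih =>
    cases j with
    | zero => rfl
    | succ i =>
      have e : List.replicate (i + 1 + 1) (0 : Int) = 0 :: 0 :: List.replicate i 0 := by
        simp [List.replicate_succ]
      rw [e, show badB (0 :: 0 :: List.replicate i 0) =
        (condB 0 0 || badB (0 :: List.replicate i 0)) from rfl,
        show (0 : Int) :: List.replicate i 0 = List.replicate (i + 1) 0 from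
          (List.replicate_succ ..).symm, ih]
      decide

theorem badB_good (m : List Int) (k : Nat) (hnz : ∀ v ∈ m, v ≠ 0) (hadj : hasAdj m = false) :
    badB (m ++ List.replicate k 0) = false := by
  match m with
  | [] => simp only [List.nil_append]; exact badB_zeros k
  | [a] =>
    cases k with
    | zero => rfl
    | succ j =>
      have e : ([a] ++ List.replicate (j + 1) 0) = a :: 0 :: List.replicate j 0 := by
        simp [List.replicate_succ]
      rw [e, show badB (a :: 0 :: List.replicate j 0) =
        (condB a 0 || badB (0 :: List.replicate j 0)) from rfl,
        show (0 : Int) :: List.replicate j 0 = List.replicate (j + 1) 0 from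
          (List.replicate_succ ..).symm, badB_zeros]
      simp [condB]
  | a :: b :: t =>
    have h1 : (a == b) = false := by
      by_contra hc
      simp only [Bool.not_eq_false] at hc
      rw [show hasAdj (a :: b :: t) = ((a == b) || hasAdj (b :: t)) from rfl, hc] at hadj
      simp at hadj
    have h2 : hasAdj (b :: t) = false := by
      rw [show hasAdj (a :: b :: t) = ((a == b) || hasAdj (b :: t)) from rfl, h1] at hadj
      simpa using hadj
    have e : ((a :: b :: t) ++ List.replicate k 0) = a :: b :: (t ++ List.replicate k 0) := by simp
    rw [e, show badB (a :: b :: (t ++ List.replicate k 0)) =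
      (condB a b || badB (b :: (t ++ List.replicate k 0))) from rfl]
    have hcB : condB a b = false := by
      have ha : a ≠ 0 := hnz a (by simp)
      simp [condB, h1, ha]
    rw [hcB]
    have e2 : b :: (t ++ List.replicate k 0) = (b :: t) ++ List.replicate k 0 := by simp
    rw [e2, badB_good (b :: t) k (fun v hv => hnz v (by simp at hv ⊢; tauto)) h2]
    rfl

theorem badB_decompose (M : List Int) (h : badB M = false) :
    ∃ m k, M = m ++ List.replicate k 0 ∧ (∀ v ∈ m, v ≠ 0) ∧ hasAdj m = false := by
  induction M with
  | nil => exact ⟨[], 0, by simp, by simp, rfl⟩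
  | cons a t ih =>
    cases t with
    | nil =>
      by_cases ha : a = 0
      · exact ⟨[], 1, by simp [ha], by simp, rfl⟩
      · exact ⟨[a], 0, by simp, by simpa using ha, rfl⟩
    | cons b t' =>
      rw [show badB (a :: b :: t') = (condB a b || badB (b :: t')) from rfl] at h
      have hc : condB a b = false := by
        cases hcb : condB a b with
        | false => rfl
        | true => rw [hcb] at h; simp at h
      have ht : badB (b :: t') = false := by rw [hc] at h; simpa using h
      obtain ⟨m, k, heq, hnz, hadj⟩ := ih ht
      by_cases ha : a = 0
      · subst ha
        have hb : b = 0 := by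
          by_contra hb
          simp [condB, hb] at hc
        have hm : m = [] := by
          cases m with
          | nil => rfl
          | cons c m' =>
            have hbc : b = c := by
              have := congrArg List.headI heq; simpa using this
            have hc0 := hnz c (by simp)
            omega
        subst hm
        refine ⟨[], k + 1, ?_, by simp, rfl⟩
        simp only [List.nil_append] at heq ⊢
        rw [List.replicate_succ, ← heq, hb]
      · refine ⟨a :: m, k, by simp [heq], fun v hv => ?_, ?_⟩
        · rcases List.mem_cons.mp hv with rfl | hv'
          · exact ha
          · exact hnz v hv'
        · cases m with
          | nil => rfl
          | cons c m' =>
            have hbc : b = c := by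
              have := congrArg List.headI heq; simpa using this
            have hac : (a == c) = false := by
              by_contra hcc
              simp only [Bool.not_eq_false] at hcc
              have hab : a = c := by simpa using hcc
              rw [← hbc] at hab
              subst hab
              simp [condB, ha] at hc
            rw [show hasAdj (a :: c :: m') = ((a == c) || hasAdj (c :: m')) from rfl, hac]
            simpa using hadj

theorem filter_good (m : List Int) (k : Nat) (hnz : ∀ v ∈ m, v ≠ 0) :
    (m ++ List.replicate k 0).filter (fun v => v != 0) = m := by
  rw [List.filter_append]
  have h1 : m.filter (fun v => v != 0) = m :=
    List.filter_eq_self.mpr (fun a ha => by simpa using hnz a ha)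
  have h2 : (List.replicate k (0 : Int)).filter (fun v => v != 0) = [] := by simp
  rw [h1, h2, List.append_nil]

theorem moveB_fixed_iff (M : List Int) : moveB M = M ↔ badB M = false := by
  constructor
  · intro h
    have hnzt : ∀ v ∈ M.filter (fun v => v != 0), v ≠ 0 := by
      intro v hv; simpa using (List.of_mem_filter hv)
    have hnzm : ∀ v ∈ mergePairsB (M.filter (fun v => v != 0)), v ≠ 0 :=
      mergePairsB_nonzero _ hnzt
    have hMv : moveB M = mergePairsB (M.filter (fun v => v != 0)) ++
        List.replicate (M.length - (mergePairsB (M.filter (fun v => v != 0))).length) 0 := rfl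
    have hM : M = mergePairsB (M.filter (fun v => v != 0)) ++
        List.replicate (M.length - (mergePairsB (M.filter (fun v => v != 0))).length) 0 :=
      (hMv.symm.trans h).symm
    have hf : M.filter (fun v => v != 0) = mergePairsB (M.filter (fun v => v != 0)) := by
      conv_lhs => rw [hM]
      exact filter_good _ _ hnzm
    have hfix : mergePairsB (mergePairsB (M.filter (fun v => v != 0))) =
        mergePairsB (M.filter (fun v => v != 0)) := by
      conv_lhs => rw [← hf]
    have hadj : hasAdj (mergePairsB (M.filter (fun v => v != 0))) = false := by
      by_contra hcc
      simp only [Bool.not_eq_false] at hcc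
      have hlt := mergePairsB_length_lt _ hcc
      rw [hfix] at hlt
      omega
    calc badB M
        = badB (mergePairsB (M.filter (fun v => v != 0)) ++
            List.replicate (M.length - (mergePairsB (M.filter (fun v => v != 0))).length) 0) := by
          rw [← hM]
      _ = false := badB_good _ _ hnzm hadj
  · intro h
    obtain ⟨m, k, heq, hnz, hadj⟩ := badB_decompose M h
    have hf : M.filter (fun v => v != 0) = m := by rw [heq]; exact filter_good m k hnz
    have hmp : mergePairsB m = m := mergePairsB_of_noAdj m hadj
    rw [show moveB M = mergePairsB (M.filter (fun v => v != 0)) ++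
      List.replicate (M.length - (mergePairsB (M.filter (fun v => v != 0))).length) 0 from rfl]
    rw [hf, hmp]
    have hlen : M.length - m.length = k := by rw [heq]; simp
    rw [hlen]
    exact heq.symm

theorem badB_eq_move (M : List Int) : badB M = (moveB M != M) := by
  by_cases h : moveB M = M
  · rw [(moveB_fixed_iff M).mp h, h]
    simp
  · have hb : badB M = true := by
      by_contra hcc
      simp only [Bool.not_eq_true] at hcc
      exact h ((moveB_fixed_iff M).mpr hcc)
    rw [hb]
    exact (bne_iff_ne.mpr h).symm

-- ===== VERDICT (by name: the statement is the Claim_ definition above) =====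
theorem mergable_spec : Claim_equal_mergable := by
  intro original direction _
  show mergable original direction = mergable_alt original direction
  have hA : mergable original direction =
      badA (if direction == -1 then original.reverse else original) := by
    rw [show mergable original direction =
      mergableLoop (if direction == -1 then original.reverse else original) 0 from rfl,
      loopA_eq, List.drop_zero]
  have hB : mergable_alt original direction =
      (moveB (if direction == -1 then original else original.reverse) !=
        (if direction == -1 then original else original.reverse)) := rfl
  rw [hA, hB, badA_eq_badB_reverse, ← badB_eq_move]
  congr 1
  by_cases h : direction == -1 <;> simp [h]
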